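-- pv_equiv track=rewrite | github.com/FevenKitsune/Fox-Utilities | utils/makerenderable.py | make_renderable
-- ===== SOURCE A (Python) =====
-- def make_renderable(data: str) -> str:
--     """
--     Modify a given string to allow it to display in Discord.
--
--     :param data: String with formatting characters.
--     :return: String with the appropriate escape characters to render string correctly.
--     """
--     markup_characters = {
--         "_": "\\_",
--         "*": "\\*",
--         "~": "\\~",
--         "|": "\\|"
--     }
--
--     for key, replacement in markup_characters.items():
--         data = data.replace(key, replacement)
--
--     return data
-- ===== SOURCE B (Python) =====
-- def make_renderable(data: str) -> str:
--     """
--     Modify a given string to allow it to display in Discord.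
--
--     :param data: String with formatting characters.
--     :return: String with the appropriate escape characters to render string correctly.
--     """
--     return "".join("\\" + c if c in "_*~|" else c for c in data)
-- ===== Notes on version B (the rewrite author's own statement) =====
-- stated objective: idiomatic
-- what changed: Replaced four sequential full-string replace passes by a single scan that emits a backslash before each of the four markup characters, built with one join over a comprehension.
import Mathlib
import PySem

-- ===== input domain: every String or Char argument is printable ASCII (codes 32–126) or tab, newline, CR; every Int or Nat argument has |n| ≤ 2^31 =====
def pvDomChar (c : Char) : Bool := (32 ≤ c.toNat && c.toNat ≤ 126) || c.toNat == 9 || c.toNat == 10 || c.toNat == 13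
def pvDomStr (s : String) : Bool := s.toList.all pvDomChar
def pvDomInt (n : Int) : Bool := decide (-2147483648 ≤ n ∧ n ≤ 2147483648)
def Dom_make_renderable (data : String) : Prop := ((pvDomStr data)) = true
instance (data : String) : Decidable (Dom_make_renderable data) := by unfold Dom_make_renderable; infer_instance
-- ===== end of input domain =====

-- B escapes Discord markup in a single scan instead of A's four sequential replace passes; same output.

-- ===== PORT A =====
def make_renderable (data : String) : String :=
  -- four sequential replace passes, in the dict's insertion order
  let d1 := PySem.Str.replace data "_" "\\_"
  let d2 := PySem.Str.replace d1 "*" "\\*"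
  let d3 := PySem.Str.replace d2 "~" "\\~"
  PySem.Str.replace d3 "|" "\\|"

-- ===== PORT B =====
def make_renderable_alt (data : String) : String :=
  -- ''.join('\\'+c if c in '_*~|' else c for c in data)
  String.ofList (data.toList.flatMap
    (fun c => if c == '_' || c == '*' || c == '~' || c == '|' then ['\\', c] else [c]))

-- ===== PRECONDITION & SPEC =====
def Spec_make_renderable (data : String) (out : String) : Prop := out = make_renderable_alt data
instance (data : String) (out : String) : Decidable (Spec_make_renderable data out) := by unfold Spec_make_renderable; infer_instance

-- ===== CLAIM (what is proved, stated in full; the proofs are below) =====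
def Claim_equal_make_renderable : Prop := ∀ (data : String), Dom_make_renderable data → Spec_make_renderable data (make_renderable data)

-- ===== LEMMAS AND PROOFS =====

-- replace with a single-character pattern is a per-character flatMap
theorem go_single (c : Char) (ns : List Char) :
    ∀ (l acc : List Char) (fuel : Nat), l.length ≤ fuel →
      PySem.Chars.replace.go [c] ns fuel l acc
        = acc.reverse ++ l.flatMap (fun x => if x = c then ns else [x]) := by
  intro l
  induction l with
  | nil =>
      intro acc fuel _
      cases fuel <;> simp [PySem.Chars.replace.go]
  | cons h t ih =>
      intro acc fuel hle
      cases fuel with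
      | zero => simp at hle
      | succ f =>
          by_cases hc : h = c
          · subst hc
            have : List.isPrefixOf [h] (h :: t) = true := by
              simp [List.isPrefixOf]
            simp only [PySem.Chars.replace.go, this, if_pos, List.length_cons,
              List.length_nil, List.drop_succ_cons, List.drop_zero]
            rw [ih (ns.reverse ++ acc) f (by simpa using hle)]
            simp
          · have : List.isPrefixOf [c] (h :: t) = false := by
              simp [List.isPrefixOf]
              intro h'; exact absurd h'.symm hc
            simp only [PySem.Chars.replace.go, this]
            rw [ih (h :: acc) f (by simpa using hle)]
            simp [hc]

theorem replace_single (s : List Char) (c : Char) (ns : List Char) :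
    PySem.Chars.replace s [c] ns = s.flatMap (fun x => if x = c then ns else [x]) := by
  rw [PySem.Chars.replace]
  simp [go_single c ns s [] s.length (Nat.le_refl _)]

-- ===== VERDICT (by name: the statement is the Claim_ definition above) =====
theorem make_renderable_spec : Claim_equal_make_renderable := by
  intro data _
  unfold Spec_make_renderable make_renderable make_renderable_alt PySem.Str.replace
  simp only [String.toList_ofList]
  rw [show ("_" : String).toList = ['_'] from rfl, show ("\\_" : String).toList = ['\\','_'] from rfl,
      show ("*" : String).toList = ['*'] from rfl, show ("\\*" : String).toList = ['\\','*'] from rfl,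
      show ("~" : String).toList = ['~'] from rfl, show ("\\~" : String).toList = ['\\','~'] from rfl,
      show ("|" : String).toList = ['|'] from rfl, show ("\\|" : String).toList = ['\\','|'] from rfl]
  rw [replace_single, replace_single, replace_single, replace_single]
  rw [List.flatMap_assoc, List.flatMap_assoc, List.flatMap_assoc]
  congr 1
  congr 1
  funext x
  by_cases h1 : x = '_' <;> by_cases h2 : x = '*' <;> by_cases h3 : x = '~' <;> by_cases h4 : x = '|' <;>
    simp_all
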